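-- pv_equiv track=rewrite | github.com/SubratoBiswas/trinamix-conversion-workbench | backend/app/parsers/fbdi_parser.py | _looks_like_module_label
-- ===== SOURCE A (Python) =====
-- from typing import Any
--
-- def _looks_like_module_label(value: Any) -> bool:
--     if not value:
--         return False
--     s = str(value).strip()
--     keywords = (
--         "management", "planning", "order promising", "operations",
--         "supply", "common", "interface", "loader",
--     )
--     return any(k in s.lower() for k in keywords) and len(s) < 80
-- ===== SOURCE B (Python) =====
-- from typing import Any
--
-- _KEYWORDS = (
--     "management", "planning", "order promising", "operations",
--     "supply", "common", "interface", "loader",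
-- )
--
-- # index the keywords by first character once, so the scan over the string
-- # only tries keywords that can possibly start at the current position
-- _BY_FIRST = {}
-- for _k in _KEYWORDS:
--     _BY_FIRST.setdefault(_k[0], []).append(_k)
--
--
-- def _looks_like_module_label(value: Any) -> bool:
--     if not value:
--         return False
--     s = str(value).strip()
--     if len(s) >= 80:
--         return False
--     t = s.lower()
--     for i, c in enumerate(t):
--         for k in _BY_FIRST.get(c, ()):
--             if t.startswith(k, i):
--                 return True
--     return False
-- ===== Notes on version B (the rewrite author's own statement) =====
-- stated objective: alternative
-- what changed: Replaces A's keyword-major loop (one full substring scan of the string per keyword) by a single position-major scan of the lowered string using a first-character index of the keywords built once (at each position only keywords that can start with that character are probed via startswith), with the length bound checked as an early return before any scanning.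
import Mathlib
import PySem

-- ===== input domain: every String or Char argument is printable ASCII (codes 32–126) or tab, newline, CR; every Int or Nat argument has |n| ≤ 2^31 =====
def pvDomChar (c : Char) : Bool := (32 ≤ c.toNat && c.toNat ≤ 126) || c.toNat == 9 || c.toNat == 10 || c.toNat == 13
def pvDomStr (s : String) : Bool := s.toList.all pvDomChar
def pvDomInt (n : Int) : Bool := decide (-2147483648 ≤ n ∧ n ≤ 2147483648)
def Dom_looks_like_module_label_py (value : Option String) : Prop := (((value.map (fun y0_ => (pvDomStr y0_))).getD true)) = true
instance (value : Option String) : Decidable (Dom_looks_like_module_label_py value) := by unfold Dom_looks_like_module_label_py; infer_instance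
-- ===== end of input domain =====

-- B replaces A's per-keyword substring loop by a single position scan over the lowered
-- string with a first-character index of the keywords (only keywords that can start at
-- the current character are tried), and checks the length bound first: alternative, same cost.


-- ===== PORT A =====
-- keyword-major: for each keyword, one substring test against the whole lowered string
def pvKeywordsA : List String :=
  ["management", "planning", "order promising", "operations",
   "supply", "common", "interface", "loader"]

def looks_like_module_label_py (value : Option String) : Bool :=
  match value with
  | none => false
  | some v =>
    if v == "" then false
    else
      let s := PySem.Str.strip v
      (pvKeywordsA.any (fun k => PySem.Str.isIn k (PySem.Str.lower s)))
        && decide (PySem.Str.len s < 80)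

-- ===== PORT B =====
-- the first-character index _BY_FIRST: keywords that can start at a given character
def pvByFirst (c : Char) : List (List Char) :=
  if c = 'm' then ["management".toList]
  else if c = 'p' then ["planning".toList]
  else if c = 'o' then ["order promising".toList, "operations".toList]
  else if c = 's' then ["supply".toList]
  else if c = 'c' then ["common".toList]
  else if c = 'i' then ["interface".toList]
  else if c = 'l' then ["loader".toList]
  else []

-- the position scan: at each position, try only the keywords indexed by its character
def pvScan : List Char → Bool
  | [] => false
  | c :: t => (pvByFirst c).any (fun k => PySem.Chars.startswith (c :: t) k) || pvScan t

def looks_like_module_label_py_alt (value : Option String) : Bool :=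
  match value with
  | none => false
  | some v =>
    if v == "" then false
    else
      let s := PySem.Str.strip v
      if decide (80 ≤ PySem.Str.len s) then false
      else pvScan (PySem.Chars.lower s.toList)

-- ===== PRECONDITION & SPEC =====
def Spec_looks_like_module_label_py (value : Option String) (out : Bool) : Prop := out = looks_like_module_label_py_alt value
instance (value : Option String) (out : Bool) : Decidable (Spec_looks_like_module_label_py value out) := by unfold Spec_looks_like_module_label_py; infer_instance

-- ===== CLAIM (what is proved, stated in full; the proofs are below) =====
def Claim_equal_looks_like_module_label_py : Prop := ∀ (value : Option String), Dom_looks_like_module_label_py value → Spec_looks_like_module_label_py value (looks_like_module_label_py value)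

-- ===== LEMMAS AND PROOFS =====

lemma kw_management : ("management").toList = ['m', 'a', 'n', 'a', 'g', 'e', 'm', 'e', 'n', 't'] := by decide
lemma kw_planning : ("planning").toList = ['p', 'l', 'a', 'n', 'n', 'i', 'n', 'g'] := by decide
lemma kw_order_promising : ("order promising").toList = ['o', 'r', 'd', 'e', 'r', ' ', 'p', 'r', 'o', 'm', 'i', 's', 'i', 'n', 'g'] := by decide
lemma kw_operations : ("operations").toList = ['o', 'p', 'e', 'r', 'a', 't', 'i', 'o', 'n', 's'] := by decide
lemma kw_supply : ("supply").toList = ['s', 'u', 'p', 'p', 'l', 'y'] := by decide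
lemma kw_common : ("common").toList = ['c', 'o', 'm', 'm', 'o', 'n'] := by decide
lemma kw_interface : ("interface").toList = ['i', 'n', 't', 'e', 'r', 'f', 'a', 'c', 'e'] := by decide
lemma kw_loader : ("loader").toList = ['l', 'o', 'a', 'd', 'e', 'r'] := by decide

-- at one position, trying only the keywords indexed by the head character is the
-- same as trying all keywords (a keyword with a different first char cannot match)
lemma pvByFirst_any_eq (c : Char) (t : List Char) :
    (pvByFirst c).any (fun k => PySem.Chars.startswith (c :: t) k)
      = (pvKeywordsA.map String.toList).any (fun k => PySem.Chars.startswith (c :: t) k) := by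
  rw [Bool.eq_iff_iff]
  simp only [pvByFirst, pvKeywordsA, List.map, List.any_cons, List.any_nil,
    Bool.or_eq_true, PySem.Chars.startswith_iff,
    kw_management, kw_planning, kw_order_promising, kw_operations,
    kw_supply, kw_common, kw_interface, kw_loader, List.cons_prefix_cons]
  split_ifs with h1 h2 h3 h4 h5 h6 h7
  · subst h1; simp [PySem.Chars.startswith_iff, List.cons_prefix_cons]
  · subst h2; simp [PySem.Chars.startswith_iff, List.cons_prefix_cons]
  · subst h3; simp [PySem.Chars.startswith_iff, List.cons_prefix_cons]
  · subst h4; simp [PySem.Chars.startswith_iff, List.cons_prefix_cons]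
  · subst h5; simp [PySem.Chars.startswith_iff, List.cons_prefix_cons]
  · subst h6; simp [PySem.Chars.startswith_iff, List.cons_prefix_cons]
  · subst h7; simp [PySem.Chars.startswith_iff, List.cons_prefix_cons]
  · simp only [List.any_nil, Bool.false_eq_true, false_iff]
    rintro (⟨rfl,-⟩|⟨rfl,-⟩|⟨rfl,-⟩|⟨rfl,-⟩|⟨rfl,-⟩|⟨rfl,-⟩|⟨rfl,-⟩|⟨rfl,-⟩|f)
    exacts [h1 rfl, h2 rfl, h3 rfl, h3 rfl, h4 rfl, h5 rfl, h6 rfl, h7 rfl, f]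

-- the position scan finds a match iff some keyword occurs as an infix
lemma pvScan_eq_any_isIn (cs : List Char) :
    pvScan cs = pvKeywordsA.any (fun k => PySem.Chars.isIn k.toList cs) := by
  induction cs with
  | nil => decide
  | cons c t ih =>
    have hpt : ∀ k : String,
        PySem.Chars.isIn k.toList (c :: t)
          = (PySem.Chars.startswith (c :: t) k.toList || PySem.Chars.isIn k.toList t) := by
      intro k
      rw [Bool.eq_iff_iff]
      simp [PySem.Chars.isIn_iff_infix, PySem.Chars.startswith_iff, List.infix_cons_iff]
    simp only [pvScan, ih, pvByFirst_any_eq]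
    rw [Bool.eq_iff_iff]
    simp only [Bool.or_eq_true, List.any_eq_true, List.mem_map, hpt]
    constructor
    · rintro (⟨k, ⟨k', hk', rfl⟩, h⟩ | ⟨k, hk, h⟩)
      · exact ⟨k', hk', by simp [h]⟩
      · exact ⟨k, hk, by simp [h]⟩
    · rintro ⟨k, hk, h⟩
      rcases h with h | h
      · exact Or.inl ⟨k.toList, ⟨k, hk, rfl⟩, h⟩
      · exact Or.inr ⟨k, hk, h⟩

-- the length test written as an early-exit 'if' versus a trailing '&&'
lemma pvLen_if_and (a : Bool) (n : Int) :
    (a && decide (n < 80)) = (!decide (80 ≤ n) && a) := by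
  rcases lt_or_ge n 80 with h | h
  · simp [h, not_le.mpr h]
  · simp [h, not_lt.mpr h]

-- ===== VERDICT (by name: the statement is the Claim_ definition above) =====
theorem looks_like_module_label_py_spec : Claim_equal_looks_like_module_label_py := by
  intro value _
  unfold Spec_looks_like_module_label_py looks_like_module_label_py looks_like_module_label_py_alt
  cases value with
  | none => rfl
  | some v =>
    cases hvb : (v == "") with
    | true => simp [hvb]
    | false =>
      simp only [hvb, Bool.false_eq_true, if_false]
      rw [pvScan_eq_any_isIn]
      simp only [PySem.Str.isIn_eq, PySem.Str.toList_lower, Bool.if_false_left,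
        decide_eq_true_eq]
      exact pvLen_if_and _ _
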